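-- pv_equiv track=rewrite | github.com/gemaquejr/restaurant-orders | src/analyze_log.py | not_visit_by_joao
-- ===== SOURCE A (Python) =====
-- def not_visit_by_joao(data):
--     days_of_the_week = set()
--     not_visit = set()
--
--     for index in data:
--         days_of_the_week.add(index[2])
--         if index[0] == 'joao':
--             not_visit.add(index[2])
--     return days_of_the_week.difference(not_visit)
-- ===== SOURCE B (Python) =====
-- def not_visit_by_joao(data):
--     by_day = {}
--     for name, _dish, day in data:
--         by_day.setdefault(day, set()).add(name)
--     return {day for day, names in by_day.items() if 'joao' not in names}
-- ===== Notes on version B (the rewrite author's own statement) =====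
-- stated objective: alternative
-- what changed: Instead of one pass maintaining two parallel sets (all days, joao-days) and a final set difference, B first builds a day-to-visitors dict index and then filters its items for days whose visitor set lacks 'joao'.
import Mathlib
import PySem

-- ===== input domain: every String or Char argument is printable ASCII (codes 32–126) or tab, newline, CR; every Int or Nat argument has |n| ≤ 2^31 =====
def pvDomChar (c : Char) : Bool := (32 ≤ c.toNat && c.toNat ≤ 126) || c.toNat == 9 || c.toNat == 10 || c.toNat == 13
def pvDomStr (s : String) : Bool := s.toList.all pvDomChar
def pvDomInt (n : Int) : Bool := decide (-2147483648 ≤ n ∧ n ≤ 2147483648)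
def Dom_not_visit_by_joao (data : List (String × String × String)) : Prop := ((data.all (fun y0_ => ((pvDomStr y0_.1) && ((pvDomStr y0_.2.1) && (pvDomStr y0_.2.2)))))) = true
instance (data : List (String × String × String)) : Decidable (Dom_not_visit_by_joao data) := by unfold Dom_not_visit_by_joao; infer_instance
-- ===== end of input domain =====

-- B replaces A's two parallel sets + final set difference with a day→visitors dict index
-- built in one pass and a filter over its items (alternative decomposition; return-value equal).

-- ===== PORT A =====
def not_visit_by_joao (data : List (String × String × String)) : List String :=
  let st := data.foldl
    (fun (st : PySem.Set String × PySem.Set String) index =>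
      (st.1.add index.2.2, if index.1 == "joao" then st.2.add index.2.2 else st.2))
    (PySem.Set.empty, PySem.Set.empty)
  PySem.Set.diff st.1 st.2

-- ===== PORT B =====
def not_visit_by_joao_alt (data : List (String × String × String)) : List String :=
  let byDay : PySem.Dict String (PySem.Set String) :=
    data.foldl (fun d e => d.insert e.2.2 ((d.getD e.2.2 PySem.Set.empty).add e.1)) ⟨[]⟩
  PySem.Set.ofList ((byDay.items.filter (fun kv => !(kv.2.contains "joao"))).map (·.1))

-- ===== PRECONDITION & SPEC =====
def Spec_not_visit_by_joao (data : List (String × String × String)) (out : List String) : Prop := out = not_visit_by_joao_alt data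
instance (data : List (String × String × String)) (out : List String) : Decidable (Spec_not_visit_by_joao data out) := by unfold Spec_not_visit_by_joao; infer_instance

-- ===== CLAIM (what is proved, stated in full; the proofs are below) =====
def Claim_equal_not_visit_by_joao : Prop := ∀ (data : List (String × String × String)), Dom_not_visit_by_joao data → Spec_not_visit_by_joao data (not_visit_by_joao data)

-- ===== LEMMAS AND PROOFS =====

-- A's fold: the two set components accumulate independently.
theorem foldA_eq (l : List (String × String × String)) (days notv : PySem.Set String) :
    l.foldl
      (fun (st : PySem.Set String × PySem.Set String) index =>
        (st.1.add index.2.2, if index.1 == "joao" then st.2.add index.2.2 else st.2))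
      (days, notv)
    = (PySem.Set.update days (l.map (·.2.2)),
       PySem.Set.update notv ((l.filter (fun e => e.1 == "joao")).map (·.2.2))) := by
  induction l generalizing days notv with
  | nil => simp [PySem.Set.update]
  | cons e l ih =>
    simp only [PySem.Set.update, List.foldl_cons, List.map_cons, List.filter_cons] at ih ⊢
    by_cases h : (e.1 == "joao") = true
    · rw [if_pos h, if_pos h, ih, List.map_cons, List.foldl_cons]
    · rw [if_neg h, if_neg h, ih]

-- B's fold: the visitor set indexed at day k accumulates the names of k's entries.
theorem foldB_getD (l : List (String × String × String))
    (d : PySem.Dict String (PySem.Set String)) (k : String) :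
    ((l.foldl (fun d e => d.insert e.2.2 ((d.getD e.2.2 PySem.Set.empty).add e.1)) d).getD k PySem.Set.empty)
    = PySem.Set.update (d.getD k PySem.Set.empty)
        ((l.filter (fun e => e.2.2 == k)).map (·.1)) := by
  induction l generalizing d with
  | nil => simp [PySem.Set.update]
  | cons e l ih =>
    simp only [PySem.Set.update, List.foldl_cons, List.filter_cons] at ih ⊢
    rw [ih, PySem.Dict.getD_insert]
    by_cases h : (e.2.2 == k) = true
    · rw [if_pos h, if_pos (beq_iff_eq.mp h).symm, List.map_cons, List.foldl_cons,
          beq_iff_eq.mp h]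
    · rw [if_neg h, if_neg (fun hkk => h (beq_iff_eq.mpr (hkk.symm)))]

-- In a dict with distinct keys, filtering items by the value equals filtering keys by getD.
theorem items_filter_map_fst (l : List (String × PySem.Set String))
    (q : PySem.Set String → Bool) (dflt : PySem.Set String) (h : (l.map (·.1)).Nodup) :
    ((l.filter (fun kv => q kv.2)).map (·.1))
    = (l.map (·.1)).filter
        (fun k => q ((PySem.Dict.mk l).getD k dflt)) := by
  induction l with
  | nil => simp
  | cons e l ih =>
    simp only [List.map_cons, List.nodup_cons] at h
    have hd : (PySem.Dict.mk (e :: l)).getD e.1 dflt = e.2 := by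
      simp [PySem.Dict.getD, PySem.Dict.get?, List.find?]
    have htl : ∀ k ∈ l.map (·.1),
        (PySem.Dict.mk (e :: l)).getD k dflt
          = (PySem.Dict.mk l).getD k dflt := by
      intro k hk
      have hne : ¬ (e.1 == k) = true := by
        simp only [beq_iff_eq]
        intro hkk; exact h.1 (hkk ▸ hk)
      simp [PySem.Dict.getD, PySem.Dict.get?, List.find?, hne]
    have hrw := List.filter_congr (l := l.map (·.1)) (fun k hk => congrArg q (htl k hk))
    by_cases hq : q e.2 = true <;>
      simp [hd, hq, hrw, ih h.2]

-- The day is in A's joao-day set iff "joao" is in B's visitor set for that day.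
theorem contains_iff (data : List (String × String × String)) (x : String) :
    (PySem.Set.ofList ((data.filter (fun e => e.1 == "joao")).map (·.2.2))).contains x
    = (PySem.Set.ofList ((data.filter (fun e => e.2.2 == x)).map (·.1))).contains "joao" := by
  simp only [PySem.Set.contains, List.contains_eq_mem, decide_eq_decide]
  simp only [PySem.Set.mem_ofList, List.mem_map, List.mem_filter, beq_iff_eq]
  constructor
  · rintro ⟨e, ⟨he, hj⟩, hx⟩; exact ⟨e, ⟨he, hx⟩, hj⟩
  · rintro ⟨e, ⟨he, hx⟩, hj⟩; exact ⟨e, ⟨he, hj⟩, hx⟩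

-- ===== VERDICT (by name: the statement is the Claim_ definition above) =====
theorem not_visit_by_joao_spec : Claim_equal_not_visit_by_joao := by
  intro data _hdom
  unfold Spec_not_visit_by_joao
  simp only [not_visit_by_joao, not_visit_by_joao_alt]
  rw [foldA_eq]
  set D : PySem.Dict String (PySem.Set String) :=
    data.foldl (fun d e => d.insert e.2.2 ((d.getD e.2.2 PySem.Set.empty).add e.1)) ⟨[]⟩ with hD
  have hkeys : D.keys = PySem.Set.ofList (data.map (·.2.2)) := by
    rw [hD, PySem.Dict.keys_foldl_insert_key data (·.2.2)
      (fun d e => (d.getD e.2.2 PySem.Set.empty).add e.1) ⟨[]⟩]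
    rfl
  have hnodupk : D.keys.Nodup := by rw [hkeys]; exact PySem.Set.nodup_ofList _
  rw [items_filter_map_fst D.items (fun s => !(s.contains "joao")) PySem.Set.empty hnodupk]
  have hitems : D.items.map (·.1) = D.keys := rfl
  rw [hitems, PySem.Set.ofList_eq_self_of_nodup _ (List.Nodup.filter _ hnodupk)]
  have hmk : (PySem.Dict.mk D.items) = D := rfl
  rw [hmk]
  have hofl : PySem.Set.update PySem.Set.empty (data.map (·.2.2))
      = PySem.Set.ofList (data.map (·.2.2)) := rfl
  show PySem.Set.diff (PySem.Set.update PySem.Set.empty (data.map (·.2.2))) _ = _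
  rw [hofl, ← hkeys]
  simp only [PySem.Set.diff]
  apply List.filter_congr
  intro x _hx
  have hB := foldB_getD data ⟨[]⟩ x
  rw [← hD] at hB
  rw [hB]
  congr 1
  exact contains_iff data x
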